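-- pv_equiv track=rewrite | github.com/keppen/path_grapher | grids.py | _init_shape_offsets
-- ===== SOURCE A (Python) =====
-- def _init_shape_offsets(shape):
--     offsets = []
--     dim = len(shape)
--     for i in range(dim):
--         offset = 1
--         for j in range(i + 1, dim):
--             offset *= shape[j]
--         offsets.append(offset)
--     return tuple(offsets)
-- ===== SOURCE B (Python) =====
-- def _init_shape_offsets(shape):
--     acc = 1
--     out = []
--     for x in reversed(shape):
--         out.append(acc)
--         acc *= x
--     return tuple(reversed(out))
-- ===== Notes on version B (the rewrite author's own statement) =====
-- stated objective: faster
-- what changed: Replaces the nested loop recomputing each suffix product from scratch with a single backward pass keeping a running product.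
import Mathlib
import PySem

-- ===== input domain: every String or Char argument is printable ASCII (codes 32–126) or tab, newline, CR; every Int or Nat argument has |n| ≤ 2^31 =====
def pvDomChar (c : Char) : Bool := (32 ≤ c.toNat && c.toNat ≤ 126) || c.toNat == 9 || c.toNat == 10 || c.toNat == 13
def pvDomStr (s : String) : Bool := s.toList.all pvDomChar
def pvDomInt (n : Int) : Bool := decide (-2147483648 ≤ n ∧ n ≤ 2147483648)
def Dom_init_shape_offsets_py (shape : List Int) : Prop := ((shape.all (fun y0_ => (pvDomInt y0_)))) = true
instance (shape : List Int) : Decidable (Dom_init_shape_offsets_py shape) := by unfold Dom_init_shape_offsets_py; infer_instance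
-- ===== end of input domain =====

-- B replaces A's quadratic nested loop by a single backward pass with a running product (asymptotically faster).


-- ===== PORT A =====
-- literal transliteration of A: for i in range(dim): offset = 1; for j in range(i+1, dim): offset *= shape[j]; append
def init_shape_offsets_py (shape : List Int) : List Int :=
  (PySem.List.pyRange 0 (shape.length : Int) 1).foldl
    (fun offsets i =>
      offsets ++ [(PySem.List.pyRange (i + 1) (shape.length : Int) 1).foldl
        (fun offset j => offset * PySem.List.pyGetD shape j 0) 1])
    []

-- ===== PORT B =====
-- literal transliteration of B: one backward pass, running product
def init_shape_offsets_py_alt (shape : List Int) : List Int :=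
  ((shape.reverse.foldl (fun (st : List Int × Int) x => (st.1 ++ [st.2], st.2 * x)) ([], 1)).1).reverse

-- ===== PRECONDITION & SPEC =====
def Spec_init_shape_offsets_py (shape : List Int) (out : List Int) : Prop := out = init_shape_offsets_py_alt shape
instance (shape : List Int) (out : List Int) : Decidable (Spec_init_shape_offsets_py shape out) := by unfold Spec_init_shape_offsets_py; infer_instance

-- ===== CLAIM (what is proved, stated in full; the proofs are below) =====
def Claim_equal_init_shape_offsets_py : Prop := ∀ (shape : List Int), Dom_init_shape_offsets_py shape → Spec_init_shape_offsets_py shape (init_shape_offsets_py shape)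

-- ===== LEMMAS AND PROOFS =====

-- suffix products: the common specification both ports are reduced to
def sufProds : List Int → List Int
  | [] => []
  | _ :: xs => xs.prod :: sufProds xs

lemma foldl_mul_eq_prod (xs : List Int) : xs.foldl (· * ·) 1 = xs.prod := by
  simp [List.prod_eq_foldl]

lemma range_map_drop_prod (shape : List Int) :
    (List.range shape.length).map (fun k => (shape.drop (k + 1)).prod) = sufProds shape := by
  induction shape with
  | nil => simp [sufProds]
  | cons x xs ih =>
    simp only [List.length_cons, List.range_succ_eq_map, List.map_cons, List.map_map, sufProds]
    refine congrArg₂ List.cons (by simp) ?_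
    rw [← ih]
    apply List.map_congr_left
    intro k _
    simp [Function.comp]

lemma a_eq_sufProds (shape : List Int) : init_shape_offsets_py shape = sufProds shape := by
  unfold init_shape_offsets_py
  rw [PySem.List.foldl_append_singleton_eq_map]
  have hmap : ∀ i ∈ PySem.List.pyRange 0 (shape.length : Int) 1,
      (PySem.List.pyRange (i + 1) (shape.length : Int) 1).foldl
        (fun offset j => offset * PySem.List.pyGetD shape j 0) 1
      = (shape.drop (i + 1).toNat).prod := by
    intro i hi
    have h0 : (0 : Int) ≤ i := ((PySem.List.mem_pyRange_one).1 hi).1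
    rw [PySem.List.foldl_pyRange_pyGetD' shape 0 (fun a b => a * b) 1 (a := i + 1) (by omega)]
    exact foldl_mul_eq_prod _
  rw [List.map_congr_left hmap]
  rw [PySem.List.pyRange_one, List.map_map]
  rw [← range_map_drop_prod shape]
  simp only [Int.sub_zero, Int.toNat_natCast]
  apply List.map_congr_left
  intro k _
  have h1 : ((0:Int) + (k:Int) + 1).toNat = k + 1 := by omega
  simp only [Function.comp, h1]

lemma alt_fold_spec (xs : List Int) :
    xs.reverse.foldl (fun (st : List Int × Int) x => (st.1 ++ [st.2], st.2 * x)) ([], 1)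
      = ((sufProds xs).reverse, xs.prod) := by
  induction xs with
  | nil => simp [sufProds]
  | cons x xs ih =>
    simp only [List.reverse_cons, List.foldl_append, ih, List.foldl_cons, List.foldl_nil, sufProds]
    simp [mul_comm]

lemma b_eq_sufProds (shape : List Int) : init_shape_offsets_py_alt shape = sufProds shape := by
  unfold init_shape_offsets_py_alt
  rw [alt_fold_spec]
  simp

-- ===== VERDICT (by name: the statement is the Claim_ definition above) =====
theorem init_shape_offsets_py_spec : Claim_equal_init_shape_offsets_py := by
  intro shape _
  unfold Spec_init_shape_offsets_py
  rw [a_eq_sufProds, b_eq_sufProds]
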